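-- pv_equiv track=rewrite | github.com/We-can-apply-GPU/aMeLiDoSu-HW1- | DNN/calculation.py | sigmoidPrimeMaxout
-- ===== SOURCE A (Python) =====
-- z = [0]
--
-- a = [(0,0),(1,0)]
--
-- def sigmoidPrimeMaxout(x):
--     for i in range(x.__len__()):
--         for j in range(x[i].__len__()):
--             k = 0
--             while z[k] < x[i][j]:
--                 k+=1
--                 if k == z.__len__():
--                     break
--             x[i][j] = a[k][0]
--     return x
-- ===== SOURCE B (Python) =====
-- z = [0]
--
-- a = [(0,0),(1,0)]
--
-- def sigmoidPrimeMaxout(x):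
--     # Direct elementwise positivity test; note: builds a new list instead of
--     # mutating x in place (return value is identical to A's).
--     return [[1 if v > 0 else 0 for v in row] for row in x]
-- ===== Notes on version B (the rewrite author's own statement) =====
-- stated objective: simpler
-- what changed: Replaced the index-driven in-place double loop, with its per-element while-scan over the constant threshold list and tuple-table lookup, by a direct nested comprehension computing 1 if v > 0 else 0 for each element; B builds a new list instead of mutating x in place (the return value is identical).
import Mathlib
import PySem

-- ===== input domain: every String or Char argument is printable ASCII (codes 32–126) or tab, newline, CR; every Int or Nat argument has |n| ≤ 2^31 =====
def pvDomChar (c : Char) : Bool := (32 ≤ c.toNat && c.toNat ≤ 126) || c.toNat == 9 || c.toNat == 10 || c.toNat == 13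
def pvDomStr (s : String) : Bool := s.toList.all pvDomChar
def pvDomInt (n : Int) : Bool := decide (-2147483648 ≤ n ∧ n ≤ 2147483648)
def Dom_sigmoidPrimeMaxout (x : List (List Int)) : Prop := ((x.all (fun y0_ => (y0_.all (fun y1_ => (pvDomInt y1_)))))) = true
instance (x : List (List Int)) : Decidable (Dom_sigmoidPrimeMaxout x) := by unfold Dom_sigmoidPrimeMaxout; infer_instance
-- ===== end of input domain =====

-- B replaces A's per-element while-scan over the constant table z/a by a direct 0/1
-- positivity comprehension (simpler); A mutates x in place, B builds a new list —
-- the equivalence proved here is about the RETURN value.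

-- ===== PORT A =====
-- module constant z = [0]
def pvZ : List Int := [0]
-- module constant a = [(0,0),(1,0)]
def pvAtab : List (Int × Int) := [(0, 0), (1, 0)]

-- the 'while z[k] < x[i][j]: k += 1; if k == len(z): break' loop, fueled by len(z)
-- (the loop body runs at most len(z) times before the break fires)
def pvWhileK (v : Int) : Nat → Nat → Nat
  | 0, k => k
  | fuel + 1, k =>
    if PySem.List.pyGetD pvZ (k : Int) 0 < v then
      if k + 1 = pvZ.length then k + 1 else pvWhileK v fuel (k + 1)
    else k

def sigmoidPrimeMaxout (x : List (List Int)) : List (List Int) :=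
  (PySem.List.pyRange 0 (x.length : Int) 1).foldl (fun acc i =>
    (PySem.List.pyRange 0 ((PySem.List.pyGetD acc i []).length : Int) 1).foldl (fun acc2 j =>
      let k := pvWhileK (PySem.List.pyGetD (PySem.List.pyGetD acc2 i []) j 0) pvZ.length 0
      PySem.List.pySetD acc2 i
        (PySem.List.pySetD (PySem.List.pyGetD acc2 i []) j
          (PySem.List.pyGetD pvAtab (k : Int) (0, 0)).1)) acc) x

-- ===== PORT B =====
def sigmoidPrimeMaxout_alt (x : List (List Int)) : List (List Int) :=
  x.map (fun row => row.map (fun v => if v > 0 then (1 : Int) else 0))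

-- ===== PRECONDITION & SPEC =====
def Spec_sigmoidPrimeMaxout (x : List (List Int)) (out : List (List Int)) : Prop := out = sigmoidPrimeMaxout_alt x
instance (x : List (List Int)) (out : List (List Int)) : Decidable (Spec_sigmoidPrimeMaxout x out) := by unfold Spec_sigmoidPrimeMaxout; infer_instance

-- ===== CLAIM (what is proved, stated in full; the proofs are below) =====
def Claim_equal_sigmoidPrimeMaxout : Prop := ∀ (x : List (List Int)), Dom_sigmoidPrimeMaxout x → Spec_sigmoidPrimeMaxout x (sigmoidPrimeMaxout x)

-- ===== LEMMAS AND PROOFS =====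

-- the per-element threshold function B computes
def pvF (v : Int) : Int := if v > 0 then 1 else 0

-- one processed element moves from the untouched suffix to the mapped prefix
theorem pv_shift {α : Type} (f : α → α) (l : List α) (n : Nat) (h : n < l.length) :
    List.take n (l.map f) ++ (l.drop n).set 0 (f l[n]) = List.take (n + 1) (l.map f) ++ l.drop (n + 1) := by
  have hd : l.drop n = l[n] :: l.drop (n + 1) := List.drop_eq_getElem_cons h
  rw [hd, List.set_cons_zero, List.take_add_one,
    List.getElem?_eq_getElem (by simpa using h : n < (l.map f).length)]
  simp

-- A's while scan + table lookup computes pvF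
theorem pvElem_eq (v : Int) :
    (PySem.List.pyGetD pvAtab ((pvWhileK v pvZ.length 0 : Nat) : Int) (0, 0)).1 = pvF v := by
  by_cases h : 0 < v <;>
    simp [pvWhileK, pvZ, pvAtab, pvF, h, PySem.List.pyGetD]

theorem pv_inner (i : Nat) (row : List Int) (acc : List (List Int))
    (hi : i < acc.length) (hrow : acc[i] = row) (m : Nat) (hm : m ≤ row.length) :
    (PySem.List.pyRange 0 (m : Int) 1).foldl (fun acc2 j =>
      let k := pvWhileK (PySem.List.pyGetD (PySem.List.pyGetD acc2 (i : Int) []) j 0) pvZ.length 0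
      PySem.List.pySetD acc2 (i : Int)
        (PySem.List.pySetD (PySem.List.pyGetD acc2 (i : Int) []) j
          (PySem.List.pyGetD pvAtab (k : Int) (0, 0)).1)) acc
    = acc.set i ((row.take m).map pvF ++ row.drop m) := by
  induction m with
  | zero =>
    simp [PySem.List.pyRange_one_eq_nil]
    rw [← hrow, List.set_getElem_self]
  | succ m ih =>
    have hm' : m ≤ row.length := Nat.le_of_succ_le hm
    have hmr : m < row.length := hm
    have hcast : ((m + 1 : Nat) : Int) = (m : Int) + 1 := by push_cast; ring
    rw [hcast, PySem.List.pyRange_one_succ_right (by positivity), List.foldl_append, ih hm']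
    simp only [List.foldl_cons, List.foldl_nil]
    have hgetacc : PySem.List.pyGetD (acc.set i ((row.take m).map pvF ++ row.drop m)) (i : Int) []
        = (row.take m).map pvF ++ row.drop m := by
      simp only [PySem.List.pyGetD_natCast, List.getD_eq_getElem?_getD]
      rw [List.getElem?_set_self (by omega)]
      rfl
    rw [hgetacc]
    have hgetm : PySem.List.pyGetD ((row.take m).map pvF ++ row.drop m) ((m : Nat) : Int) 0
        = row[m] := by
      rw [PySem.List.pyGetD_natCast]
      rw [List.getD_eq_getElem?_getD, List.getElem?_append_right (by simp [Nat.min_eq_left hm'])]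
      simp [Nat.min_eq_left hm', hmr]
    rw [hgetm, pvElem_eq]
    have hset : PySem.List.pySetD ((row.take m).map pvF ++ row.drop m) ((m : Nat) : Int) (pvF row[m])
        = (row.take (m + 1)).map pvF ++ row.drop (m + 1) := by
      rw [PySem.List.pySetD_natCast]
      rw [List.set_append_right _ _ (by simp [Nat.min_eq_left hm'])]
      simp only [List.length_map, List.length_take, Nat.min_eq_left hm', Nat.sub_self]
      rw [List.map_take, List.map_take]
      exact pv_shift pvF row m hmr
    rw [hset, PySem.List.pySetD_natCast, List.set_set]

theorem pv_outer (x : List (List Int)) (n : Nat) (hn : n ≤ x.length) :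
    (PySem.List.pyRange 0 (n : Int) 1).foldl (fun acc i =>
      (PySem.List.pyRange 0 ((PySem.List.pyGetD acc i []).length : Int) 1).foldl (fun acc2 j =>
        let k := pvWhileK (PySem.List.pyGetD (PySem.List.pyGetD acc2 i []) j 0) pvZ.length 0
        PySem.List.pySetD acc2 i
          (PySem.List.pySetD (PySem.List.pyGetD acc2 i []) j
            (PySem.List.pyGetD pvAtab (k : Int) (0, 0)).1)) acc) x
    = (x.take n).map (fun row => row.map pvF) ++ x.drop n := by
  induction n with
  | zero => simp [PySem.List.pyRange_one_eq_nil]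
  | succ n ih =>
    have hn' : n ≤ x.length := Nat.le_of_succ_le hn
    have hnx : n < x.length := hn
    have hcast : ((n + 1 : Nat) : Int) = (n : Int) + 1 := by push_cast; ring
    rw [hcast, PySem.List.pyRange_one_succ_right (by positivity), List.foldl_append, ih hn']
    simp only [List.foldl_cons, List.foldl_nil]
    have hlenacc : ((x.take n).map (fun row => row.map pvF) ++ x.drop n).length = x.length := by
      simp [Nat.min_eq_left hn']
      omega
    have hin : n < ((x.take n).map (fun row => row.map pvF) ++ x.drop n).length := by omega
    have haccn : ((x.take n).map (fun row => row.map pvF) ++ x.drop n)[n]'hin = x[n] := by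
      rw [List.getElem_append_right (by simp [Nat.min_eq_left hn'])]
      simp [Nat.min_eq_left hn']
    have hget : PySem.List.pyGetD ((x.take n).map (fun row => row.map pvF) ++ x.drop n) ((n : Nat) : Int) [] = x[n] := by
      rw [PySem.List.pyGetD_natCast, List.getD_eq_getElem?_getD,
        List.getElem?_eq_getElem hin, haccn]
      rfl
    rw [hget]
    rw [pv_inner n (x[n]) _ hin haccn (x[n].length) (le_refl _)]
    simp only [List.take_length, List.drop_length, List.append_nil]
    rw [List.set_append_right _ _ (by simp [Nat.min_eq_left hn'])]
    simp only [List.length_map, List.length_take, Nat.min_eq_left hn', Nat.sub_self]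
    rw [List.map_take, List.map_take]
    exact pv_shift (fun row => row.map pvF) x n hnx

-- ===== VERDICT (by name: the statement is the Claim_ definition above) =====
theorem sigmoidPrimeMaxout_spec : Claim_equal_sigmoidPrimeMaxout := by
  intro x _
  unfold Spec_sigmoidPrimeMaxout sigmoidPrimeMaxout sigmoidPrimeMaxout_alt
  have := pv_outer x x.length (le_refl _)
  rw [this]
  simp [pvF]
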